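-- pv_equiv track=rewrite | github.com/gimdongwon/Catch_python_tmi | Chaebeen/4th/Muji_Mukbang_Live/solution.py | next_food
-- ===== SOURCE A (Python) =====
-- def next_food(food_times, k):
--     result = 0
--     zero = []
--     n = len(food_times)
--
--     for i in range(n, n + max(food_times) * n):
--         index = abs(n - i) % n
--         if food_times[index] > 0:
--             food_times[index] -= 1
--             result += 1
--             if result > k:
--                 return index + 1
--             if food_times[index] == 0:
--                 zero.append(index)
--                 if len(set(zero)) == n:
--                     return -1
--     return -1
-- ===== SOURCE B (Python) =====
-- # Round-at-a-time re-implementation: process whole rounds in bulk instead of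
-- # second-by-second index arithmetic. Returns the same value as A; does not
-- # mutate food_times (A decrements its argument in place).
-- def next_food(food_times, k):
--     k = max(k, 0)  # negative elapsed time behaves like zero seconds
--     food = food_times
--     while True:
--         positives = [i for i, t in enumerate(food) if t > 0]
--         p = len(positives)
--         if p == 0:
--             return -1
--         if k < p:
--             return positives[k] + 1
--         k -= p
--         food = [t - 1 for t in food]
-- ===== Notes on version B (the rewrite author's own statement) =====
-- stated objective: alternative
-- what changed: Replaces A's second-by-second simulation (a loop over range(n, n+max*n) with abs-mod index arithmetic, in-place decrements and a zero-index set) by a round-at-a-time loop that collects the positive indices once per round, answers directly when fewer than k remain in the round, and otherwise bulk-subtracts one whole round; B stops as soon as k is exhausted or no food remains instead of spinning through all max*n iterations.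
-- crash fix: On the empty list A raises ValueError (max of empty sequence) while B returns -1 (no food, so nothing is eaten). — e.g. on next_food([], 0): A raises ValueError, B returns -1
import Mathlib
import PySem

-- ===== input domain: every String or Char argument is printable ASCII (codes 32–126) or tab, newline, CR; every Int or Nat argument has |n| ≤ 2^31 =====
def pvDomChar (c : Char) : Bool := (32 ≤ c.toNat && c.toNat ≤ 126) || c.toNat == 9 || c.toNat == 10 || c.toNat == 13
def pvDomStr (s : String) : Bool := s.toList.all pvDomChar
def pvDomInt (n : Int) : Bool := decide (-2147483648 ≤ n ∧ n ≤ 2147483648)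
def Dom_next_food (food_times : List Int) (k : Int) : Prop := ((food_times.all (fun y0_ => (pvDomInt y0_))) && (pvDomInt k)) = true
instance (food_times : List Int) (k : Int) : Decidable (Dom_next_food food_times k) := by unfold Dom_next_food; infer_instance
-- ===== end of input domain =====

-- B replaces A's second-by-second simulation by a round-at-a-time loop (same return
-- value on every nonempty list; note A mutates its argument in place while B does
-- not — the equivalence proved here is about the return value only).

-- ===== PORT A =====
-- A's `for i in range(n, n + max(food_times)*n)` loop with early returns,
-- as a count-up over i (Python's range is lazy — the index sequence is not
-- materialized); state = (food_times, result, zero).  `index` is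
-- `abs(n-i) % n`, nonnegative and < n on every admitted run (n ≥ 1), so
-- `getD`/`set` are exact for Python's `food_times[index]` read/write and
-- Nat `%` agrees with Python's `%` on these nonnegative operands.
def nextFoodLoop (k : Int) (stop : Int) (i : Int) (food : List Int) (result : Int) (zero : List Int) : Int :=
  if _h : i < stop then
    let index : Nat := ((food.length : Int) - i).natAbs % food.length
    let v := food.getD index 0
    if 0 < v then
      let food' := food.set index (v - 1)
      let result' := result + 1
      if k < result' then (index : Int) + 1
      else if v - 1 = 0 then
        let zero' := zero ++ [(index : Int)]
        if (PySem.Set.ofList zero').length = food.length then -1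
        else nextFoodLoop k stop (i+1) food' result' zero'
      else nextFoodLoop k stop (i+1) food' result' zero
    else nextFoodLoop k stop (i+1) food result zero
  else -1
termination_by (stop - i).toNat
decreasing_by all_goals omega

def next_food (food_times : List Int) (k : Int) : Int :=
  match PySem.List.max? food_times (fun x => x) with
  | none => 0  -- Python raises ValueError on the empty list; excluded by Pre_
  | some m =>
    nextFoodLoop k
      ((food_times.length : Int) + m * (food_times.length : Int))
      (food_times.length : Int) food_times 0 []

-- ===== PORT B =====
-- Source B's `positives = [i for i, t in enumerate(food) if t > 0]`
def posList (food : List Int) : List Int :=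
  ((PySem.List.enumerate food 0).filter (fun it => decide (0 < it.2))).map (fun it => it.1)

-- Source B's `while True` loop; after the clamp `k = max(k, 0)` the budget stays
-- nonnegative throughout, so it is carried as a Nat.  `positives[k]` is read
-- only when `k < p`, so `getD` is exact for Python's indexing there.
def nextFoodAltLoop (food : List Int) (kk : Nat) : Int :=
  if _h0 : (posList food).length = 0 then -1
  else if _hk : kk < (posList food).length then (posList food).getD kk 0 + 1
  else nextFoodAltLoop (food.map (fun t => t - 1)) (kk - (posList food).length)
termination_by kk
decreasing_by omega

def next_food_alt (food_times : List Int) (k : Int) : Int :=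
  nextFoodAltLoop food_times (max k 0).toNat

-- ===== PRECONDITION & SPEC =====
-- Pre_ excludes only the empty list, on which Python's max() raises ValueError.
def Pre_next_food (food_times : List Int) (_k : Int) : Prop := food_times ≠ []
instance (food_times : List Int) (k : Int) : Decidable (Pre_next_food food_times k) := by unfold Pre_next_food; infer_instance
def pvWitness_next_food : List Int × Int := ([1, 3, 2], 4)

-- On the empty list A raises ValueError (max of empty sequence) while B returns -1.
def Raises_next_food (food_times : List Int) (_k : Int) : Prop := food_times = []
instance (food_times : List Int) (k : Int) : Decidable (Raises_next_food food_times k) := by unfold Raises_next_food; infer_instance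
def pvRaiseWitness_next_food : List Int × Int := ([], 0)
def pvRaiseWitnessOut_next_food : Int := -1

def Spec_next_food (food_times : List Int) (k : Int) (out : Int) : Prop := out = next_food_alt food_times k
instance (food_times : List Int) (k : Int) (out : Int) : Decidable (Spec_next_food food_times k out) := by unfold Spec_next_food; infer_instance

-- ===== CLAIM (what is proved, stated in full; the proofs are below) =====
def Claim_equal_next_food : Prop := ∀ (food_times : List Int) (k : Int), Dom_next_food food_times k → Pre_next_food food_times k → Spec_next_food food_times k (next_food food_times k)
def Claim_raises_next_food : Prop := (∀ (food_times : List Int) (k : Int), Dom_next_food food_times k → Raises_next_food food_times k → ¬ Pre_next_food food_times k) ∧ (Dom_next_food (pvRaiseWitness_next_food.1) (pvRaiseWitness_next_food.2) ∧ Raises_next_food (pvRaiseWitness_next_food.1) (pvRaiseWitness_next_food.2) ∧ next_food_alt (pvRaiseWitness_next_food.1) (pvRaiseWitness_next_food.2) = pvRaiseWitnessOut_next_food)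

-- ===== LEMMAS AND PROOFS =====

-- Proof-side view of A's loop over the explicit index list.
def nextFoodLoopList (k : Int) : List Int → List Int → Int → List Int → Int
  | [], _, _, _ => -1
  | i :: is, food, result, zero =>
    let index : Nat := ((food.length : Int) - i).natAbs % food.length
    let v := food.getD index 0
    if 0 < v then
      let food' := food.set index (v - 1)
      let result' := result + 1
      if k < result' then (index : Int) + 1
      else if v - 1 = 0 then
        let zero' := zero ++ [(index : Int)]
        if (PySem.Set.ofList zero').length = food.length then -1
        else nextFoodLoopList k is food' result' zero'
      else nextFoodLoopList k is food' result' zero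
    else nextFoodLoopList k is food result zero

lemma loop_eq_list (k stop : Int) :
    ∀ (fuel : Nat) (i : Int), (stop - i).toNat ≤ fuel → ∀ (food : List Int) (res : Int) (zero : List Int),
    nextFoodLoop k stop i food res zero
      = nextFoodLoopList k (PySem.List.pyRange i stop 1) food res zero := by
  intro fuel
  induction fuel with
  | zero =>
    intro i h food res zero
    rw [nextFoodLoop, dif_neg (by omega), PySem.List.pyRange_one_eq_nil (by omega)]
    rfl
  | succ f ih =>
    intro i h food res zero
    by_cases hi : i < stop
    · rw [nextFoodLoop, dif_pos hi, PySem.List.pyRange_one_cons hi]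
      simp only [nextFoodLoopList]
      split_ifs <;> first
      | rfl
      | rw [ih (i+1) (by omega)]
    · rw [nextFoodLoop, dif_neg hi, PySem.List.pyRange_one_eq_nil (by omega)]
      rfl

lemma loop_eq_list' (k stop i : Int) (food : List Int) (res : Int) (zero : List Int) :
    nextFoodLoop k stop i food res zero
      = nextFoodLoopList k (PySem.List.pyRange i stop 1) food res zero :=
  loop_eq_list k stop (stop - i).toNat i le_rfl food res zero

-- The indices of the strictly positive entries of a list, starting at position s.
def pidx : List Int → Int → List Int
  | [], _ => []
  | v :: t, s => if 0 < v then s :: pidx t (s + 1) else pidx t (s + 1)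

-- One whole round of A decrements exactly the positive entries.
def decA (xs : List Int) : List Int := xs.map (fun v => if 0 < v then v - 1 else v)

-- One round of A's loop (indices j, j+1, …), written structurally over the
-- remaining entries; Sum.inr = early return out of the whole loop.
def roundA (k : Int) (n : Nat) : List Int → Nat → Int → List Int → (List Int × Int × List Int) ⊕ Int
  | [], _, res, zero => .inl ([], res, zero)
  | v :: t, j, res, zero =>
    if 0 < v then
      if k < res + 1 then .inr ((j : Int) + 1)
      else if v - 1 = 0 then
        if (PySem.Set.ofList (zero ++ [(j : Int)])).length = n then .inr (-1)
        else
          match roundA k n t (j+1) (res+1) (zero ++ [(j : Int)]) with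
          | .inl (t', r, z) => .inl ((v-1) :: t', r, z)
          | .inr a => .inr a
      else
        match roundA k n t (j+1) (res+1) zero with
        | .inl (t', r, z) => .inl ((v-1) :: t', r, z)
        | .inr a => .inr a
    else
      match roundA k n t (j+1) res zero with
      | .inl (t', r, z) => .inl (v :: t', r, z)
      | .inr a => .inr a

set_option maxHeartbeats 1000000 in
lemma inner_round (k : Int) (n : Nat) :
    ∀ (todo done : List Int) (res : Int) (zero rest : List Int) (base q : Nat),
    done.length + todo.length = n → base = n * q → 1 ≤ q →
    nextFoodLoopList k ((List.range' (base + done.length) todo.length).map (fun j : Nat => (j : Int)) ++ rest)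
        (done ++ todo) res zero
      = (match roundA k n todo done.length res zero with
         | .inl (t', r, z) => nextFoodLoopList k rest (done ++ t') r z
         | .inr a => a) := by
  intro todo
  induction todo with
  | nil => intro done res zero rest base q hlen hbase hq; simp [roundA]
  | cons v t ih =>
    intro done res zero rest base q hlen hbase hq
    obtain ⟨q', rfl⟩ : ∃ q', q = q' + 1 := ⟨q - 1, by omega⟩
    have hmul : n * (q' + 1) = n * q' + n := Nat.mul_succ n q'
    simp only [List.length_cons]
    rw [List.range'_succ, List.map_cons, List.cons_append]
    have hflen : (done ++ v :: t).length = n := by simp at hlen ⊢; omega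
    have hjn : done.length < n := by simp at hlen; omega
    have hidx : (((done ++ v :: t).length : Int) - ((base + done.length : Nat) : Int)).natAbs
        % (done ++ v :: t).length = done.length := by
      rw [hflen]
      subst hbase
      have h1 : ((n : Int) - ((n * (q' + 1) + done.length : Nat) : Int)).natAbs
          = n * q' + done.length := by rw [hmul]; push_cast; omega
      rw [h1, Nat.mul_add_mod, Nat.mod_eq_of_lt hjn]
    have hget : (done ++ v :: t).getD done.length 0 = v := by simp [List.getD]
    have hset : (done ++ v :: t).set done.length (v - 1) = done ++ (v - 1) :: t := by simp
    have IH : ∀ (x : Int) (res' : Int) (zero' : List Int),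
        nextFoodLoopList k (List.map (fun j : Nat => (j : Int)) (List.range' (base + done.length + 1) t.length) ++ rest)
            (done ++ x :: t) res' zero'
          = (match roundA k n t (done.length + 1) res' zero' with
             | Sum.inl (t', r, z) => nextFoodLoopList k rest (done ++ x :: t') r z
             | Sum.inr a => a) := by
      intro x res' zero'
      rw [show done ++ x :: t = (done ++ [x]) ++ t by simp,
          show base + done.length + 1 = base + (done ++ [x]).length by simp; omega,
          ih (done ++ [x]) res' zero' rest base (q'+1) (by simp; simp at hlen; omega) hbase hq]
      cases hr : roundA k n t ((done ++ [x]).length) res' zero' with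
      | inl st =>
        rcases st with ⟨t', r, z⟩
        rw [show (done ++ [x]).length = done.length + 1 by simp] at hr
        rw [hr]; simp
      | inr a =>
        rw [show (done ++ [x]).length = done.length + 1 by simp] at hr
        rw [hr]
    simp only [nextFoodLoopList]
    rw [hidx, hget, hset, hflen]
    simp only [roundA]
    split_ifs with hv hk hz hfull
    · rfl
    · rfl
    · rw [IH]; cases roundA k n t (done.length + 1) (res+1) (zero ++ [(done.length : Int)]) with
      | inl st => rcases st with ⟨t', r, z⟩; rfl
      | inr a => rfl
    · rw [IH]; cases roundA k n t (done.length + 1) (res+1) zero with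
      | inl st => rcases st with ⟨t', r, z⟩; rfl
      | inr a => rfl
    · rw [IH]; cases roundA k n t (done.length + 1) res zero with
      | inl st => rcases st with ⟨t', r, z⟩; rfl
      | inr a => rfl
lemma cover_all (zero : List Int) (n : Nat)
    (hmem : ∀ x ∈ zero, ∃ i : Nat, i < n ∧ x = (i : Int))
    (hlen : (PySem.Set.ofList zero).length = n) :
    ∀ i : Nat, i < n → (i : Int) ∈ zero := by
  intro i hi
  have hnd : (PySem.Set.ofList zero).Nodup := PySem.Set.nodup_ofList zero
  have hsub : (PySem.Set.ofList zero).toFinset ⊆ Finset.image (fun i : Nat => (i : Int)) (Finset.range n) := by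
    intro x hx
    rw [List.mem_toFinset, PySem.Set.mem_ofList] at hx
    obtain ⟨i, hi, rfl⟩ := hmem x hx
    exact Finset.mem_image.2 ⟨i, Finset.mem_range.2 hi, rfl⟩
  have hcard : (Finset.image (fun i : Nat => (i : Int)) (Finset.range n)).card = n := by
    rw [Finset.card_image_of_injective _ (fun a b h => by exact_mod_cast h)]; simp
  have heq := Finset.eq_of_subset_of_card_le hsub (by
    rw [hcard, List.toFinset_card_of_nodup hnd, hlen])
  have : (i : Int) ∈ (PySem.Set.ofList zero).toFinset := by
    rw [heq]; exact Finset.mem_image.2 ⟨i, Finset.mem_range.2 hi, rfl⟩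
  rw [List.mem_toFinset, PySem.Set.mem_ofList] at this
  exact this
set_option maxHeartbeats 1000000 in
lemma round_char (k : Int) (orig : List Int) :
    ∀ (todo : List Int) (j : Nat) (res : Int) (zero : List Int) (b : Nat),
    orig.drop j = todo →
    ((b : Int) = max (k - res) 0) →
    (∀ x ∈ zero, ∃ i : Nat, i < orig.length ∧ x = (i : Int) ∧ orig.getD i 0 ≤ 1 ∧ (j ≤ i → orig.getD i 0 ≤ 0)) →
    (if b < (todo.filter (fun v => decide (0 < v))).length
     then roundA k orig.length todo j res zero = .inr ((pidx todo (j : Int)).getD b 0 + 1)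
     else ((∃ zero', roundA k orig.length todo j res zero
               = .inl (decA todo, res + ((todo.filter (fun v => decide (0 < v))).length : Int), zero')
             ∧ ∀ x ∈ zero', ∃ i : Nat, i < orig.length ∧ x = (i : Int) ∧ orig.getD i 0 ≤ 1)
           ∨ (roundA k orig.length todo j res zero = .inr (-1)
             ∧ ∀ i : Nat, i < orig.length → orig.getD i 0 ≤ 1))) := by
  intro todo
  induction todo with
  | nil =>
    intro j res zero b hdrop hb hz
    simp only [List.filter_nil, List.length_nil]
    rw [if_neg (by omega)]
    refine Or.inl ⟨zero, by simp [roundA, decA], fun x hx => ?_⟩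
    obtain ⟨i, hi, he, h1, _⟩ := hz x hx
    exact ⟨i, hi, he, h1⟩
  | cons v t ih =>
    intro j res zero b hdrop hb hz
    have hjlt : j < orig.length := by
      by_contra h
      rw [List.drop_eq_nil_of_le (by omega)] at hdrop
      exact List.cons_ne_nil v t hdrop.symm
    have horig : orig = orig.take j ++ v :: t := by
      rw [← hdrop, List.take_append_drop]
    have htlen : (orig.take j).length = j := by simp; omega
    have hget : orig.getD j 0 = v := by
      conv_lhs => rw [horig]
      rw [← htlen]
      simp [List.getD]
    have hdt : orig.drop (j+1) = t := by
      have h1 : List.drop 1 (List.drop j orig) = t := by rw [hdrop]; rfl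
      rw [List.drop_drop] at h1
      exact h1
    by_cases hv : 0 < v
    · simp only [List.filter_cons, decide_eq_true_eq, if_pos hv, List.length_cons]
      cases b with
      | zero =>
        rw [if_pos (by omega)]
        have hk : k < res + 1 := by omega
        simp only [roundA, if_pos hv, if_pos hk, pidx]
        simp [List.getD]
      | succ b' =>
        have hk : ¬ k < res + 1 := by push_cast at hb; omega
        have hb' : (b' : Int) = max (k - (res + 1)) 0 := by push_cast at hb ⊢; omega
        by_cases hz1 : v - 1 = 0
        · -- v = 1 : this index hits zero and is appended to `zero`
          have hzp : ∀ x ∈ zero ++ [(j : Int)], ∃ i : Nat, i < orig.length ∧ x = (i : Int) ∧ orig.getD i 0 ≤ 1 ∧ (j+1 ≤ i → orig.getD i 0 ≤ 0) := by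
            intro x hx
            rcases List.mem_append.1 hx with hx | hx
            · obtain ⟨i, hi, he, h1, h2⟩ := hz x hx
              exact ⟨i, hi, he, h1, fun h => h2 (by omega)⟩
            · simp at hx
              exact ⟨j, hjlt, hx, by rw [hget]; omega, fun h => absurd h (by omega)⟩
          by_cases hfull : (PySem.Set.ofList (zero ++ [(j : Int)])).length = orig.length
          · -- the -1 check fires: every index has already reached ≤ 1
            have hcov := cover_all (zero ++ [(j : Int)]) orig.length
              (fun x hx => (hzp x hx).imp (fun i hi => ⟨hi.1, hi.2.1⟩)) hfull
            have hall : ∀ i : Nat, i < orig.length → orig.getD i 0 ≤ 1 := by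
              intro i hi
              obtain ⟨i', hi', he, h1, _⟩ := hzp _ (hcov i hi)
              have : i = i' := by exact_mod_cast he
              subst this; exact h1
            have hpt : (t.filter (fun v => decide (0 < v))).length = 0 := by
              rw [List.length_eq_zero_iff, List.filter_eq_nil_iff]
              intro w hw
              obtain ⟨m, hm, hwm⟩ := List.mem_iff_getElem.1 hw
              have hml : j + 1 + m < orig.length := by
                have := hm; rw [← hdt, List.length_drop] at this; omega
              have horig2 : orig = orig.take (j+1) ++ t := by
                rw [← hdt, List.take_append_drop]
              have htlen2 : (orig.take (j+1)).length = j+1 := by simp; omega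
              have hwo : orig.getD (j+1+m) 0 = w := by
                conv_lhs => rw [horig2]
                rw [show j+1+m = (orig.take (j+1)).length + m by omega]
                rw [List.getD, List.getElem?_append_right (by omega)]
                simp [List.getElem?_eq_getElem hm, hwm]
              obtain ⟨i', hi', he, _, h2⟩ := hzp _ (hcov (j+1+m) hml)
              have : j+1+m = i' := by exact_mod_cast he
              subst this
              rw [hwo] at h2
              have := h2 (by omega)
              simp
              omega
            rw [hpt, if_neg (by omega)]
            refine Or.inr ⟨?_, hall⟩
            simp only [roundA, if_pos hv, if_neg hk, if_pos hz1, if_pos hfull]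
          · -- continue the round with the longer zero list
            have ihres := ih (j+1) (res+1) (zero ++ [(j : Int)]) b' hdt hb' hzp
            by_cases hbp : b' < (t.filter (fun v => decide (0 < v))).length
            · rw [if_pos (by omega)]
              rw [if_pos hbp] at ihres
              simp only [roundA, if_pos hv, if_neg hk, if_pos hz1, if_neg hfull, ihres]
              simp only [pidx, if_pos hv, List.getD_cons_succ]
              push_cast
              rfl
            · rw [if_neg (by omega)]
              rw [if_neg hbp] at ihres
              rcases ihres with ⟨z2, heq, hp⟩ | ⟨heq, hall⟩
              · refine Or.inl ⟨z2, ?_, hp⟩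
                simp only [roundA, if_pos hv, if_neg hk, if_pos hz1, if_neg hfull, heq]
                simp only [decA, List.map_cons, if_pos hv]
                congr 2
                push_cast
                ring
              · refine Or.inr ⟨?_, hall⟩
                simp only [roundA, if_pos hv, if_neg hk, if_pos hz1, if_neg hfull, heq]
        · -- v ≥ 2 : decremented but stays positive
          have hzp : ∀ x ∈ zero, ∃ i : Nat, i < orig.length ∧ x = (i : Int) ∧ orig.getD i 0 ≤ 1 ∧ (j+1 ≤ i → orig.getD i 0 ≤ 0) := by
            intro x hx
            obtain ⟨i, hi, he, h1, h2⟩ := hz x hx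
            exact ⟨i, hi, he, h1, fun h => h2 (by omega)⟩
          have ihres := ih (j+1) (res+1) zero b' hdt hb' hzp
          by_cases hbp : b' < (t.filter (fun v => decide (0 < v))).length
          · rw [if_pos (by omega)]
            rw [if_pos hbp] at ihres
            simp only [roundA, if_pos hv, if_neg hk, if_neg hz1, ihres]
            simp only [pidx, if_pos hv, List.getD_cons_succ]
            push_cast
            rfl
          · rw [if_neg (by omega)]
            rw [if_neg hbp] at ihres
            rcases ihres with ⟨z2, heq, hp⟩ | ⟨heq, hall⟩
            · refine Or.inl ⟨z2, ?_, hp⟩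
              simp only [roundA, if_pos hv, if_neg hk, if_neg hz1, heq]
              simp only [decA, List.map_cons, if_pos hv]
              congr 2
              push_cast
              ring
            · refine Or.inr ⟨?_, hall⟩
              simp only [roundA, if_pos hv, if_neg hk, if_neg hz1, heq]
    · -- nonpositive entry: skipped
      simp only [List.filter_cons, decide_eq_true_eq, if_neg hv]
      have hzp : ∀ x ∈ zero, ∃ i : Nat, i < orig.length ∧ x = (i : Int) ∧ orig.getD i 0 ≤ 1 ∧ (j+1 ≤ i → orig.getD i 0 ≤ 0) := by
        intro x hx
        obtain ⟨i, hi, he, h1, h2⟩ := hz x hx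
        exact ⟨i, hi, he, h1, fun h => h2 (by omega)⟩
      have ihres := ih (j+1) res zero b hdt hb hzp
      by_cases hbp : b < (t.filter (fun v => decide (0 < v))).length
      · rw [if_pos hbp]
        rw [if_pos hbp] at ihres
        simp only [roundA, if_neg hv, ihres]
        simp only [pidx, if_neg hv]
        push_cast
        rfl
      · rw [if_neg hbp]
        rw [if_neg hbp] at ihres
        rcases ihres with ⟨z2, heq, hp⟩ | ⟨heq, hall⟩
        · refine Or.inl ⟨z2, ?_, hp⟩
          simp only [roundA, if_neg hv, heq]
          simp only [decA, List.map_cons, if_neg hv]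
        · refine Or.inr ⟨?_, hall⟩
          simp only [roundA, if_neg hv, heq]
def RelF (fa fb : List Int) : Prop :=
  List.Forall₂ (fun a b => (0 < a ↔ 0 < b) ∧ (0 < a → a = b)) fa fb

lemma enum_filter_pidx : ∀ (xs : List Int) (s : Int),
    ((PySem.List.enumerate xs s).filter (fun it => decide (0 < it.2))).map (fun it => it.1)
      = pidx xs s := by
  intro xs
  induction xs with
  | nil => intro s; simp [PySem.List.enumerate_nil, pidx]
  | cons v t ih =>
    intro s
    rw [PySem.List.enumerate_cons]
    by_cases hv : 0 < v <;> simp [hv, pidx, ih]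

lemma posList_eq_pidx (xs : List Int) : posList xs = pidx xs 0 :=
  enum_filter_pidx xs 0

lemma pidx_length : ∀ (xs : List Int) (s : Int),
    (pidx xs s).length = (xs.filter (fun v => decide (0 < v))).length := by
  intro xs
  induction xs with
  | nil => intro s; simp [pidx]
  | cons v t ih =>
    intro s
    by_cases hv : 0 < v <;> simp [pidx, hv, ih]

lemma pidx_congr : ∀ (fa fb : List Int), RelF fa fb → ∀ (s : Int), pidx fa s = pidx fb s := by
  intro fa fb h
  induction h with
  | nil => intro s; rfl
  | @cons a b l1 l2 hrel htail ih =>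
    intro s
    obtain ⟨h1, h2⟩ := hrel
    by_cases hv : 0 < a
    · have hb : 0 < b := h1.mp hv
      simp [pidx, hv, hb, ih]
    · have hb : ¬ 0 < b := fun hx => hv (h1.mpr hx)
      simp [pidx, hv, hb, ih]

lemma relf_dec (fa fb : List Int) (h : RelF fa fb) : RelF (decA fa) (fb.map (fun t => t - 1)) := by
  induction h with
  | nil => exact List.Forall₂.nil
  | @cons a b l1 l2 hrel htail ih =>
    refine List.Forall₂.cons ?_ ih
    obtain ⟨h1, h2⟩ := hrel
    dsimp only
    by_cases hv : 0 < a
    · have heq := h2 hv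
      subst heq
      simp [if_pos hv]
    · have hb : ¬ 0 < b := fun hx => hv (h1.mpr hx)
      simp only [if_neg hv]
      omega

lemma relf_bound (fa fb : List Int) (c : Int) (hc : 0 ≤ c) (h : RelF fa fb)
    (hb : ∀ u ∈ fa, u ≤ c) : ∀ v ∈ fb, v ≤ c := by
  induction h with
  | nil => intro v hv; simp at hv
  | @cons a b l1 l2 hrel htail ih =>
    intro v hv
    rcases List.mem_cons.1 hv with rfl | hv
    · obtain ⟨h1, h2⟩ := hrel
      by_cases hp : 0 < v
      · have := h2 (h1.mpr hp)
        have hhead := hb a (List.mem_cons_self)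
        omega
      · omega
    · exact ih (fun u hu => hb u (List.mem_cons_of_mem _ hu)) v hv

lemma pidx_nil_of_nonpos : ∀ (xs : List Int) (s : Int), (∀ v ∈ xs, ¬ 0 < v) → pidx xs s = [] := by
  intro xs
  induction xs with
  | nil => intro s _; rfl
  | cons v t ih =>
    intro s h
    have hv := h v (by simp)
    simp [pidx, hv]
    exact ih _ (fun w hw => h w (by simp [hw]))

lemma mem_getD (xs : List Int) (w : Int) (hw : w ∈ xs) :
    ∃ i : Nat, i < xs.length ∧ xs.getD i 0 = w := by
  obtain ⟨i, hi, he⟩ := List.mem_iff_getElem.1 hw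
  exact ⟨i, hi, by simp [List.getD, List.getElem?_eq_getElem hi, he]⟩

lemma getD_nonpos (xs : List Int) (i : Nat) (h : ∀ v ∈ xs, v ≤ 0) : xs.getD i 0 ≤ 0 := by
  by_cases hi : i < xs.length
  · rw [List.getD_eq_getElem?_getD, List.getElem?_eq_getElem hi]
    exact h _ (List.getElem_mem hi)
  · rw [List.getD_eq_getElem?_getD, List.getElem?_eq_none (by omega : xs.length ≤ i)]
    simp

lemma decA_id_of_nonpos (xs : List Int) (h : ∀ v ∈ xs, ¬ 0 < v) : decA xs = xs := by
  unfold decA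
  have hc : ∀ v ∈ xs, (if 0 < v then v - 1 else v) = id v := fun v hv => by simp [h v hv]
  rw [List.map_congr_left hc, List.map_id]

lemma decA_getD_le (xs : List Int) (i : Nat) (hi : i < xs.length) (h : xs.getD i 0 ≤ 1) :
    (decA xs).getD i 0 ≤ 0 := by
  unfold decA
  rw [List.getD_eq_getElem?_getD, List.getElem?_map, List.getElem?_eq_getElem hi]
  rw [List.getD_eq_getElem?_getD, List.getElem?_eq_getElem hi] at h
  simp at h ⊢
  split <;> omega

lemma nopos_loop (k : Int) :
    ∀ (idxs food : List Int) (res : Int) (zero : List Int),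
    (∀ v ∈ food, v ≤ 0) →
    nextFoodLoopList k idxs food res zero = -1 := by
  intro idxs
  induction idxs with
  | nil => intro food res zero _; rfl
  | cons i is ih =>
    intro food res zero h
    simp only [nextFoodLoopList]
    rw [if_neg (by have := getD_nonpos food (((food.length : Int) - i).natAbs % food.length) h; omega)]
    exact ih food res zero h

lemma all_le_of_getD (xs : List Int) (c : Int) (h : ∀ i : Nat, i < xs.length → xs.getD i 0 ≤ c) :
    ∀ u ∈ xs, u ≤ c := by
  intro u hu
  obtain ⟨i, hi, he⟩ := mem_getD xs u hu
  rw [← he]; exact h i hi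

set_option maxHeartbeats 1000000 in
lemma top_loop (k : Int) :
    ∀ (r : Nat) (q : Nat) (fa fb : List Int) (res : Int) (zero : List Int) (b : Nat),
    fa ≠ [] →
    RelF fa fb →
    1 ≤ q →
    (∀ x ∈ zero, ∃ i : Nat, i < fa.length ∧ x = (i : Int) ∧ fa.getD i 0 ≤ 0) →
    ((b : Int) = max (k - res) 0) →
    (∀ v ∈ fa, v ≤ (r : Int)) →
    nextFoodLoopList k ((List.range' (fa.length * q) (r * fa.length)).map (fun j : Nat => (j : Int))) fa res zero
      = nextFoodAltLoop fb b := by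
  intro r
  induction r with
  | zero =>
    intro q fa fb res zero b hne hrel hq hz hb hbound
    have hnp : ∀ v ∈ fb, v ≤ 0 := relf_bound fa fb 0 le_rfl hrel (by exact_mod_cast hbound)
    rw [nextFoodAltLoop]
    rw [dif_pos (by
      rw [posList_eq_pidx, pidx_nil_of_nonpos fb 0 (fun v hv => by have := hnp v hv; omega)]
      rfl)]
    simp [nextFoodLoopList]
  | succ r ih =>
    intro q fa fb res zero b hne hrel hq hz hb hbound
    have hn : 0 < fa.length := List.length_pos_iff.2 hne
    have hsplit : List.range' (fa.length * q) ((r+1) * fa.length)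
        = List.range' (fa.length * q) fa.length ++ List.range' (fa.length * q + fa.length) (r * fa.length) := by
      rw [show (r+1) * fa.length = fa.length + r * fa.length by ring]
      exact Eq.symm List.range'_append_1
    rw [hsplit, List.map_append]
    have hinner := inner_round k fa.length fa [] res zero
      ((List.range' (fa.length * q + fa.length) (r * fa.length)).map (fun j : Nat => (j : Int)))
      (fa.length * q) q (by simp) rfl hq
    simp only [List.length_nil, Nat.add_zero, List.nil_append] at hinner
    rw [hinner]
    have hrc := round_char k fa fa 0 res zero b rfl hb
      (fun x hx => by
        obtain ⟨i, hi, he, h0⟩ := hz x hx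
        exact ⟨i, hi, he, by omega, fun _ => h0⟩)
    have hpl : (posList fb).length = (fa.filter (fun v => decide (0 < v))).length := by
      rw [posList_eq_pidx, ← pidx_congr fa fb hrel 0, pidx_length]
    by_cases hbp : b < (fa.filter (fun v => decide (0 < v))).length
    · rw [if_pos hbp] at hrc
      rw [hrc]
      dsimp only
      rw [nextFoodAltLoop, dif_neg (by omega), dif_pos (by omega)]
      rw [posList_eq_pidx, ← pidx_congr fa fb hrel 0]
      simp
    · rw [if_neg hbp] at hrc
      rcases hrc with ⟨z2, heq, hp2⟩ | ⟨heq, hall⟩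
      · rw [heq]
        dsimp only
        by_cases hp0 : (fa.filter (fun v => decide (0 < v))).length = 0
        · have hnpa : ∀ v ∈ fa, ¬ 0 < v := by
            rw [List.length_eq_zero_iff, List.filter_eq_nil_iff] at hp0
            intro v hv
            have := hp0 v hv; simp at this; omega
          rw [decA_id_of_nonpos fa hnpa]
          rw [nopos_loop k _ fa _ z2 (fun v hv => by have := hnpa v hv; omega)]
          rw [nextFoodAltLoop, dif_pos (by
            rw [posList_eq_pidx, pidx_nil_of_nonpos fb 0
              (fun v hv => by have := relf_bound fa fb 0 le_rfl hrel (fun u hu => by have := hnpa u hu; omega) v hv; omega)]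
            rfl)]
        · rw [nextFoodAltLoop, dif_neg (by omega), dif_neg (by omega), hpl]
          rw [← ih (q+1) (decA fa) (fb.map (fun t => t - 1)) (res + ((fa.filter (fun v => decide (0 < v))).length : Int)) z2
            (b - (fa.filter (fun v => decide (0 < v))).length)
            (by unfold decA; intro hcon; apply hne; exact List.map_eq_nil_iff.1 hcon)
            (relf_dec fa fb hrel)
            (by omega)
            (fun x hx => by
              obtain ⟨i, hi, he, h1⟩ := hp2 x hx
              exact ⟨i, by unfold decA; simp; omega, he, decA_getD_le fa i hi h1⟩)
            (by omega)
            (fun v hv => by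
              obtain ⟨u, hu, hveq⟩ := List.mem_map.1 hv
              by_cases hup : 0 < u
              · have := hbound u hu; simp [if_pos hup] at hveq; push_cast at this; omega
              · simp [if_neg hup] at hveq; omega)]
          have hlen : (decA fa).length = fa.length := by unfold decA; simp
          rw [hlen]
          ring_nf
      · rw [heq]
        dsimp only
        rw [nextFoodAltLoop]
        by_cases hp0 : (posList fb).length = 0
        · rw [dif_pos hp0]
        · rw [dif_neg hp0, dif_neg (by omega)]
          rw [nextFoodAltLoop, dif_pos (by
            rw [posList_eq_pidx, pidx_nil_of_nonpos _ 0 ?_]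
            · rfl
            · intro v hv
              obtain ⟨u, hu, hveq⟩ := List.mem_map.1 hv
              have hu1 : u ≤ 1 := relf_bound fa fb 1 (by omega) hrel
                (all_le_of_getD fa 1 hall) u hu
              omega)]
theorem next_food_eq (food : List Int) (k : Int) (hne : food ≠ []) :
    next_food food k = next_food_alt food k := by
  unfold next_food
  cases hM : PySem.List.max? food (fun x => x) with
  | none => exact absurd ((PySem.List.max?_eq_none_iff _ _).1 hM) hne
  | some m =>
    have hmax : ∀ y ∈ food, y ≤ m := fun y hy => PySem.List.max?_isMax hM y hy
    unfold next_food_alt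
    dsimp only
    rw [loop_eq_list']
    by_cases hm : m ≤ 0
    · rw [PySem.List.pyRange_one_eq_nil (by nlinarith [Int.natCast_nonneg food.length])]
      rw [show nextFoodLoopList k [] food 0 [] = -1 from rfl]
      rw [nextFoodAltLoop, dif_pos (by
        rw [posList_eq_pidx, pidx_nil_of_nonpos food 0 (fun v hv => by have := hmax v hv; omega)]
        rfl)]
    · obtain ⟨mn, rfl⟩ : ∃ mn : Nat, m = (mn : Int) := ⟨m.toNat, by omega⟩
      have hc : ((food.length : Int) + (mn : Int) * (food.length : Int) - (food.length : Int)).toNat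
          = mn * food.length := by
        rw [show (food.length : Int) + (mn : Int) * (food.length : Int) - (food.length : Int)
            = (mn : Int) * (food.length : Int) by ring, ← Nat.cast_mul, Int.toNat_natCast]
      rw [PySem.List.pyRange_one, hc]
      have hconv : (List.range (mn * food.length)).map (fun j : Nat => (food.length : Int) + j)
          = (List.range' (food.length * 1) (mn * food.length)).map (fun j : Nat => (j : Int)) := by
        rw [Nat.mul_one, List.range'_eq_map_range, List.map_map]
        exact List.map_congr_left (fun x _ => by simp)
      rw [hconv]
      exact top_loop k mn 1 food food 0 [] (max k 0).toNat hne
        ((List.forall₂_same).2 (fun x _ => ⟨Iff.rfl, fun _ => rfl⟩))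
        le_rfl
        (by simp)
        (by omega)
        (fun v hv => hmax v hv)

-- ===== VERDICT (by name: the statement is the Claim_ definition above) =====
theorem next_food_spec : Claim_equal_next_food := by
  intro food_times k _ hpre
  unfold Spec_next_food
  exact next_food_eq food_times k hpre

theorem next_food_raises : Claim_raises_next_food := by
  unfold Claim_raises_next_food
  refine ⟨fun ft k _ h => by simp [Raises_next_food] at h; simp [Pre_next_food, h], by decide, by decide, ?_⟩
  show next_food_alt [] 0 = -1
  rw [next_food_alt, nextFoodAltLoop]
  simp [posList, PySem.List.enumerate]

-- self-check: the crash-fix witness value really is what B's port returns there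
theorem next_food_raises_witness_ok :
    next_food_alt pvRaiseWitness_next_food.1 pvRaiseWitness_next_food.2 = pvRaiseWitnessOut_next_food :=
  next_food_raises.2.2.2
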